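-- pv_equiv track=rewrite | github.com/monsonlee/BigData | Project8_推荐系统入门/recommend/AlgorithmUtil.py | vect
-- ===== SOURCE A (Python) =====
-- def itemAll(users):
--     """返回users中所有的物品item"""
--     itemSet = set()
--     for user in users:
--         for item in users[user]:
--             itemSet.add(item)
--     itemList = list(itemSet)
--     itemList.sort()
--     return itemList
--
-- def vect(username, users):
--     """返回代表用户username的向量"""
--     items = itemAll(users)  # 返回所有的物品list(item1,item2...)
--     userVec = []  # 用户username的向量
--     rating = users[username]  # 返回的是{'item1':3,'item2':4...}
--     for item in items:
--         if item in rating: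
--             userVec.append(rating[item])
--         else:
--             userVec.append(0)
--     return userVec
-- ===== SOURCE B (Python) =====
-- def vect(username, users):
--     """返回代表用户username的向量"""
--     items = sorted({item for ratings in users.values() for item in ratings})
--     index = {item: i for i, item in enumerate(items)}
--     rating = users[username]
--     vec = [0] * len(items)
--     for item, value in rating.items():
--         vec[index[item]] = value
--     return vec
-- ===== Notes on version B (the rewrite author's own statement) =====
-- stated objective: alternative
-- what changed: Instead of scanning every sorted item and testing membership in the user's rating dict, B allocates a zero vector and scatters the user's ratings into it via a precomputed item->position index table.
import Mathlib
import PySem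

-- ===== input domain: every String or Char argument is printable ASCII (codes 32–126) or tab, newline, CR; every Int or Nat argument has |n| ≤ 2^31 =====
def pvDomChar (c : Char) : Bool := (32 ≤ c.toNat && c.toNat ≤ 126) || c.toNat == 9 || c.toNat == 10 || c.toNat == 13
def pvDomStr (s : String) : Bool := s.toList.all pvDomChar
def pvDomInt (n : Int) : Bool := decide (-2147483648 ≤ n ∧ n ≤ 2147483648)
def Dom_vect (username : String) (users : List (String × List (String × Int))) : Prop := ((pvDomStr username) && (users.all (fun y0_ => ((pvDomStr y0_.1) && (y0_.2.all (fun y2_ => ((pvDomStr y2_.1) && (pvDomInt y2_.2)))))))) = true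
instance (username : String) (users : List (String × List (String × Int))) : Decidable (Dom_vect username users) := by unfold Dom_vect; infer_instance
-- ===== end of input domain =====

-- B replaces A's scan-all-items-with-membership-test by scattering the user's ratings
-- into a zero vector through an item->position index table (alternative decomposition).


-- ===== PORT A =====
-- itemAll(users): the set of all item names over all users' rating dicts, then sorted
def itemAllPort (users : List (String × List (String × Int))) : List String :=
  let d := PySem.Dict.mk users
  let itemSet : PySem.Set String :=
    users.foldl (fun s pr => (d.getD pr.1 []).foldl (fun s2 p => PySem.Set.add s2 p.1) s)
      PySem.Set.empty
  -- Python sorts list(itemSet): the sorted result does not depend on set iteration order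
  PySem.List.sorted itemSet (fun x => x) false

def vect (username : String) (users : List (String × List (String × Int))) : List Int :=
  let items := itemAllPort users
  match (PySem.Dict.mk users).get? username with
  | none => []          -- Python raises KeyError here; excluded by Pre_vect
  | some rating =>
      let rd := PySem.Dict.mk rating
      items.foldl (fun vec it => vec ++ [if rd.contains it then rd.getD it 0 else 0]) []

-- ===== PORT B =====
def vect_alt (username : String) (users : List (String × List (String × Int))) : List Int :=
  -- items = sorted({item for ratings in users.values() for item in ratings})
  let itemSet : PySem.Set String :=
    users.foldl (fun s pr => pr.2.foldl (fun s2 p => PySem.Set.add s2 p.1) s) PySem.Set.empty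
  let items := PySem.List.sorted itemSet (fun x => x) false
  -- index = {item: i for i, item in enumerate(items)}
  let idx : PySem.Dict String Int :=
    (PySem.List.enumerate items 0).foldl (fun d p => d.insert p.2 p.1) PySem.Dict.empty
  match (PySem.Dict.mk users).get? username with
  | none => []          -- Python raises KeyError here; excluded by Pre_vect
  | some rating =>
      -- vec = [0]*len(items); for item, value in rating.items(): vec[index[item]] = value
      -- index[item] is always present and in range (rating's keys are among items), so the
      -- total forms getD / pySetD compute exactly what Python computes on admitted inputs
      rating.foldl (fun vec p => PySem.List.pySetD vec (idx.getD p.1 (-1)) p.2)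
        (List.replicate items.length 0)

-- ===== PRECONDITION & SPEC =====
-- Pre_vect excludes (a) usernames absent from users, on which Python A raises KeyError,
-- and (b) association lists with duplicate keys, which do not represent any Python dict
-- (both arguments are dicts in the original program, so their keys are necessarily unique).
def Pre_vect (username : String) (users : List (String × List (String × Int))) : Prop :=
  username ∈ users.map Prod.fst ∧ (users.map Prod.fst).Nodup ∧
    ∀ p ∈ users, (p.2.map Prod.fst).Nodup
instance (username : String) (users : List (String × List (String × Int))) : Decidable (Pre_vect username users) := by unfold Pre_vect; infer_instance

def pvWitness_vect : String × (List (String × List (String × Int))) :=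
  ("alice", [("alice", [("a", 3)]), ("bob", [("a", 1), ("b", 2)])])

def Spec_vect (username : String) (users : List (String × List (String × Int))) (out : List Int) : Prop := out = vect_alt username users
instance (username : String) (users : List (String × List (String × Int))) (out : List Int) : Decidable (Spec_vect username users out) := by unfold Spec_vect; infer_instance

-- ===== CLAIM (what is proved, stated in full; the proofs are below) =====
def Claim_equal_vect : Prop := ∀ (username : String) (users : List (String × List (String × Int))), Dom_vect username users → Pre_vect username users → Spec_vect username users (vect username users)

-- ===== LEMMAS AND PROOFS =====

-- membership in the nested item-collecting fold
theorem mem_itemFold (users : List (String × List (String × Int))) :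
    ∀ (s : PySem.Set String) (y : String),
      y ∈ users.foldl (fun s pr => pr.2.foldl (fun s2 p => PySem.Set.add s2 p.1) s) s
        ↔ y ∈ s ∨ ∃ pr ∈ users, y ∈ pr.2.map Prod.fst := by
  induction users with
  | nil => simp
  | cons u us ih =>
    intro s y
    simp only [List.foldl_cons, ih, PySem.Set.mem_foldl_add, List.mem_map, List.mem_cons]
    constructor
    · rintro ((h | ⟨b, hb, rfl⟩) | ⟨pr, hpr, hy⟩)
      · exact Or.inl h
      · exact Or.inr ⟨u, Or.inl rfl, ⟨b, hb, rfl⟩⟩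
      · exact Or.inr ⟨pr, Or.inr hpr, hy⟩
    · rintro (h | ⟨pr, (rfl | hpr), hy⟩)
      · exact Or.inl (Or.inl h)
      · rcases hy with ⟨b, hb, rfl⟩
        exact Or.inl (Or.inr ⟨b, hb, rfl⟩)
      · exact Or.inr ⟨pr, hpr, hy⟩

-- the item-collecting fold keeps the accumulator duplicate-free
theorem nodup_itemFold (users : List (String × List (String × Int))) :
    ∀ (s : PySem.Set String), s.Nodup →
      (users.foldl (fun s pr => pr.2.foldl (fun s2 p => PySem.Set.add s2 p.1) s) s).Nodup := by
  induction users with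
  | nil => intro s hs; simpa using hs
  | cons u us ih =>
    intro s hs
    simp only [List.foldl_cons]
    apply ih
    rw [← PySem.Set.update_map_eq_foldl_add]
    exact PySem.Set.nodup_update _ _ hs

-- with unique user keys, A's per-user lookup returns exactly the pair's own value
theorem itemFold_A_eq_B (users : List (String × List (String × Int)))
    (hnd : (users.map Prod.fst).Nodup) :
    users.foldl
        (fun s pr => ((PySem.Dict.mk users).getD pr.1 []).foldl
          (fun s2 p => PySem.Set.add s2 p.1) s) PySem.Set.empty
      = users.foldl (fun s pr => pr.2.foldl (fun s2 p => PySem.Set.add s2 p.1) s)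
          PySem.Set.empty := by
  apply PySem.List.foldl_congr_mem
  intro acc pr hpr
  have h : (PySem.Dict.mk users).getD pr.1 [] = pr.2 := by
    apply PySem.Dict.getD_of_mem_items
    · exact hpr
    · simpa [PySem.Dict.keys] using hnd
  rw [h]

-- the index dict built from enumerate(items) maps each item to its position
theorem idx_getD (items : List String) (hnd : items.Nodup) (a : String) (ha : a ∈ items) :
    ((PySem.List.enumerate items 0).foldl (fun d p => d.insert p.2 p.1)
        PySem.Dict.empty).getD a (-1) = ((items.idxOf a : Nat) : Int) := by
  set d := (PySem.List.enumerate items 0).foldl (fun d p => d.insert p.2 p.1) PySem.Dict.empty with hd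
  have hitems : d.items = (PySem.List.enumerate items 0).map (fun p => (p.2, p.1)) := by
    rw [hd, PySem.Dict.items_foldl_insert_fresh]
    · simp [PySem.Dict.empty]
    · intro p hp; simp [PySem.Dict.contains_empty]
    · have := PySem.List.map_snd_enumerate (xs := items) (s := 0)
      rw [this]; exact hnd
  have hkeys : d.keys.Nodup := by
    have h2 : d.keys = items := by
      simp only [PySem.Dict.keys, hitems, List.map_map, Function.comp_def]
      exact PySem.List.map_snd_enumerate items 0
    rw [h2]; exact hnd
  have hj : items.idxOf a < items.length := List.idxOf_lt_length_of_mem ha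
  apply PySem.Dict.getD_of_mem_items (d := d) (k := a) (v := ((items.idxOf a : Nat) : Int)) _ hkeys
  rw [hitems]
  refine List.mem_map.mpr ⟨((items.idxOf a : Int), a), ?_, rfl⟩
  rw [PySem.List.mem_enumerate_iff]
  exact ⟨items.idxOf a, hj, by simp [List.getElem_idxOf hj]⟩

-- writing x at position idxOf a of a mapped vector rewrites the map pointwise
theorem set_map_eq (items : List String) (hnd : items.Nodup) (a : String) (ha : a ∈ items)
    (x : Int) (g : String → Int) :
    (items.map g).set (items.idxOf a) x
      = items.map (fun it => if it = a then x else g it) := by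
  have hj : items.idxOf a < items.length := List.idxOf_lt_length_of_mem ha
  apply List.ext_getElem
  · simp
  · intro i h1 h2
    have hi : i < items.length := by simpa using h2
    rw [List.getElem_set, List.getElem_map, List.getElem_map]
    have hiff : items[i] = a ↔ i = items.idxOf a := by
      constructor
      · intro h
        have : items[i] = items[items.idxOf a]'hj := by rw [h, List.getElem_idxOf hj]
        exact (List.Nodup.getElem_inj_iff hnd).mp this
      · intro h; subst h; exact List.getElem_idxOf hj
    by_cases hc : i = items.idxOf a
    · simp [hc, List.getElem_idxOf hj]
    · have : ¬ items[i] = a := fun h => hc (hiff.mp h)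
      simp [Ne.symm hc, this]

-- the scatter loop over a duplicate-free rating list computes the per-item lookup map
theorem scatter_eq_map (items : List String) (hnd : items.Nodup) :
    ∀ (r : List (String × Int)) (g : String → Int),
      (r.map Prod.fst).Nodup → (∀ p ∈ r, p.1 ∈ items) →
      r.foldl (fun vec p => vec.set (items.idxOf p.1) p.2) (items.map g)
        = items.map (fun it => (PySem.Dict.mk r).getD it (g it)) := by
  intro r
  induction r with
  | nil =>
    intro g _ _
    simp [PySem.Dict.getD_eq_get?_getD, PySem.Dict.get?]
  | cons p rest ih =>
    intro g hnd2 hsub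
    rw [List.map_cons, List.nodup_cons] at hnd2
    simp only [List.foldl_cons]
    rw [set_map_eq items hnd p.1 (hsub p (List.mem_cons_self)) p.2 g]
    rw [ih (fun it => if it = p.1 then p.2 else g it) hnd2.2
        (fun q hq => hsub q (List.mem_cons_of_mem _ hq))]
    apply List.map_congr_left
    intro it _
    have hcons : (PySem.Dict.mk (p :: rest)).getD it (g it)
        = if p.1 == it then p.2 else (PySem.Dict.mk rest).getD it (g it) := by
      rw [PySem.Dict.getD_eq_get?_getD, PySem.Dict.get?_mk_cons]
      by_cases h : p.1 == it <;> simp [h, PySem.Dict.getD_eq_get?_getD]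
    rw [hcons]
    by_cases hc : it = p.1
    · have hnc : (PySem.Dict.mk rest).contains it = false := by
        rw [PySem.Dict.contains_eq_decide_mem_keys]
        simpa [PySem.Dict.keys, hc] using hnd2.1
      rw [PySem.Dict.getD_of_not_contains _ _ hnc]
      simp [hc]
    · have : (p.1 == it) = false := by simpa using fun h => hc h.symm
      rw [this]
      simp [hc]

-- the two ports agree on every admitted input
theorem vect_eq (username : String) (users : List (String × List (String × Int)))
    (hpre : Pre_vect username users) : vect username users = vect_alt username users := by
  obtain ⟨hmem, hndu, hndr⟩ := hpre
  -- the user exists: the match takes the some branch in both ports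
  obtain ⟨rating, hget⟩ : ∃ r, (PySem.Dict.mk users).get? username = some r := by
    cases h : (PySem.Dict.mk users).get? username with
    | none =>
      exfalso
      exact (PySem.Dict.get?_eq_none_iff_not_mem_keys _ _).mp h (by simpa [PySem.Dict.keys] using hmem)
    | some r => exact ⟨r, rfl⟩
  have hrmem : (username, rating) ∈ users :=
    PySem.Dict.mem_items_of_get?_eq_some _ hget
  -- the shared item list and its properties
  set itemSet : PySem.Set String :=
    users.foldl (fun s pr => pr.2.foldl (fun s2 p => PySem.Set.add s2 p.1) s) PySem.Set.empty
    with hsetdef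
  set items := PySem.List.sorted itemSet (fun x => x) false with hitemsdef
  have hset_nodup : itemSet.Nodup := nodup_itemFold users PySem.Set.empty List.nodup_nil
  have hitems_nodup : items.Nodup :=
    ((PySem.List.sorted_perm itemSet (fun x => x) false).symm).nodup hset_nodup
  have hsub : ∀ p ∈ rating, p.1 ∈ items := by
    intro p hp
    rw [hitemsdef, PySem.List.mem_sorted, hsetdef, mem_itemFold]
    exact Or.inr ⟨(username, rating), hrmem, List.mem_map.mpr ⟨p, hp, rfl⟩⟩
  -- reduce both ports
  simp only [vect, vect_alt, itemAllPort, itemFold_A_eq_B users hndu, ← hsetdef, ← hitemsdef, hget]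
  -- A's append loop is a map over items
  rw [PySem.List.foldl_append_singleton_eq_map
        (f := fun it => if (PySem.Dict.mk rating).contains it then (PySem.Dict.mk rating).getD it 0 else 0)]
  -- B's zero vector is a constant map; its scatter step writes at idxOf
  rw [← List.map_const' (l := items) (b := (0 : Int))]
  rw [PySem.List.foldl_congr_mem rating _ (fun vec p => vec.set (items.idxOf p.1) p.2) _
        (by
          intro acc p hp
          rw [idx_getD items hitems_nodup p.1 (hsub p hp), PySem.List.pySetD_natCast])]
  rw [scatter_eq_map items hitems_nodup rating (fun _ => 0) (hndr _ hrmem) hsub]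
  simp only [List.nil_append]
  apply List.map_congr_left
  intro it _
  by_cases hc : (PySem.Dict.mk rating).contains it
  · simp [hc]
  · simp only [Bool.not_eq_true] at hc
    rw [if_neg (by simp [hc]), PySem.Dict.getD_of_not_contains _ _ hc]

-- ===== VERDICT (by name: the statement is the Claim_ definition above) =====
theorem vect_spec : Claim_equal_vect := by
  intro username users _ hpre
  unfold Spec_vect
  exact vect_eq username users hpre
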